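-- pv_equiv track=rewrite | github.com/wilsalv-veri/SAURIA | verif/scripts/perf_analyzer/tensor_metrics.py | coalesce_cycle_map
-- ===== SOURCE A (Python) =====
-- def coalesce_cycle_map(
--     cycle_map: dict[int, dict[str, int]],
--     merge_gap_ps: int,
-- ) -> dict[int, dict[str, int]]:
--     if not cycle_map:
--         return {}
--
--     coalesced: dict[int, dict[str, int]] = {}
--     cluster_time: int | None = None
--     cluster_slot: dict[str, int] = {}
--     previous_time: int | None = None
--
--     for cycle_time in sorted(cycle_map):
--         if cluster_time is None:
--             cluster_time = cycle_time
--             cluster_slot = dict(cycle_map[cycle_time])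
--             previous_time = cycle_time
--             continue
--
--         if previous_time is not None and cycle_time - previous_time < merge_gap_ps:
--             for key, value in cycle_map[cycle_time].items():
--                 cluster_slot[key] = max(cluster_slot.get(key, 0), value)
--             previous_time = cycle_time
--             continue
--
--         coalesced[cluster_time] = cluster_slot
--         cluster_time = cycle_time
--         cluster_slot = dict(cycle_map[cycle_time])
--         previous_time = cycle_time
--
--     assert cluster_time is not None
--     coalesced[cluster_time] = cluster_slot
--     return coalesced
-- ===== SOURCE B (Python) =====
-- def coalesce_cycle_map(
--     cycle_map: dict[int, dict[str, int]],
--     merge_gap_ps: int,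
-- ) -> dict[int, dict[str, int]]:
--     # Phase 1: split the sorted times into clusters of consecutive times
--     # (a new cluster starts whenever the gap to the previous time is >= merge_gap_ps).
--     clusters: list[list[int]] = []
--     for t in sorted(cycle_map):
--         if clusters and t - clusters[-1][-1] < merge_gap_ps:
--             clusters[-1].append(t)
--         else:
--             clusters.append([t])
--     # Phase 2: merge each cluster, keyed by its smallest time.
--     result: dict[int, dict[str, int]] = {}
--     for cluster in clusters:
--         slot = dict(cycle_map[cluster[0]])
--         for t in cluster[1:]:
--             for key, value in cycle_map[t].items():
--                 slot[key] = max(slot.get(key, 0), value)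
--         result[cluster[0]] = slot
--     return result
-- ===== Notes on version B (the rewrite author's own statement) =====
-- stated objective: alternative
-- what changed: Replaces A's single stateful scan (four loop variables: current cluster time, slot, previous time, accumulator) with two separate passes: first group the sorted times into clusters by the gap rule, then merge each cluster's dicts keyed by its first time.
import Mathlib
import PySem

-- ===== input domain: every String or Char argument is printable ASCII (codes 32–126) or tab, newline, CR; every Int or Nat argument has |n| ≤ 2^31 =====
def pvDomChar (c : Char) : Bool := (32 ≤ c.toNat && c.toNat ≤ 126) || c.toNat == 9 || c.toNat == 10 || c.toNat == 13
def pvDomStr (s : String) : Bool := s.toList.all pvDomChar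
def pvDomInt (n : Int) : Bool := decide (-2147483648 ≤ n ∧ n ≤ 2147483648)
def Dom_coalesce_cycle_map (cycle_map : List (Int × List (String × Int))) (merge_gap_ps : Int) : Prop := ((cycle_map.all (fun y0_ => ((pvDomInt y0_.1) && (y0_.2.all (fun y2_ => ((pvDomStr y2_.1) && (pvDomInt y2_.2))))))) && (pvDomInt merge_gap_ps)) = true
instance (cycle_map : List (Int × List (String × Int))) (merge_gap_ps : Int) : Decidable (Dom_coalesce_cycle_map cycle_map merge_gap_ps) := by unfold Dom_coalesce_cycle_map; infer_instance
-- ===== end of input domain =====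

-- B replaces A's single stateful scan with two passes (cluster-building, then per-cluster merging); same cost, clearer decomposition.

-- Shared input decoding: the Python function receives nested dicts; we rebuild them
-- from the association lists exactly as Python's dict construction does (last value wins).
def pvToCM (cycle_map : List (Int × List (String × Int))) : PySem.Dict Int (PySem.Dict String Int) :=
  PySem.Dict.ofList (cycle_map.map (fun p => (p.1, PySem.Dict.ofList p.2)))

-- ===== PORT A =====
-- loop body of A: state = (coalesced, cluster_time, cluster_slot, previous_time)
def pvStepA (cm : PySem.Dict Int (PySem.Dict String Int)) (gap : Int)
    (s : PySem.Dict Int (PySem.Dict String Int) × Option Int × PySem.Dict String Int × Option Int)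
    (t : Int) : PySem.Dict Int (PySem.Dict String Int) × Option Int × PySem.Dict String Int × Option Int :=
  match s.2.1 with
  | none => (s.1, some t, cm.getD t PySem.Dict.empty, some t)   -- cycle_map[t] cannot raise: t is a key
  | some ct =>
    match s.2.2.2 with
    | some p =>
      if t - p < gap then
        (s.1, some ct,
          (cm.getD t PySem.Dict.empty).items.foldl
            (fun sl kv => sl.insert kv.1 (max (sl.getD kv.1 0) kv.2)) s.2.2.1,
          some t)
      else
        (s.1.insert ct s.2.2.1, some t, cm.getD t PySem.Dict.empty, some t)
    | none =>   -- unreachable: previous_time is set whenever cluster_time is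
        (s.1.insert ct s.2.2.1, some t, cm.getD t PySem.Dict.empty, some t)

def coalesce_cycle_map (cycle_map : List (Int × List (String × Int))) (merge_gap_ps : Int) : List (Int × List (String × Int)) :=
  let cm := pvToCM cycle_map
  if cm.items = [] then []
  else
    let fin := (PySem.List.sorted cm.keys (fun x => x) false).foldl (pvStepA cm merge_gap_ps)
                 (PySem.Dict.empty, none, PySem.Dict.empty, none)
    match fin.2.1 with
    | some ct => ((fin.1.insert ct fin.2.2.1).items).map (fun p => (p.1, p.2.items))
    | none => []   -- unreachable (the assert in A)

-- ===== PORT B =====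
-- Phase-1 loop body: append t to the last cluster or start a new one.
def pvClusterStep (gap : Int) (cls : List (List Int)) (t : Int) : List (List Int) :=
  match cls.getLast? with
  | some c =>
    match c.getLast? with
    | some p => if t - p < gap then cls.dropLast ++ [c ++ [t]] else cls ++ [[t]]
    | none => cls ++ [[t]]   -- unreachable: clusters are nonempty
  | none => cls ++ [[t]]

def pvMergeInto (sl d : PySem.Dict String Int) : PySem.Dict String Int :=
  d.items.foldl (fun sl kv => sl.insert kv.1 (max (sl.getD kv.1 0) kv.2)) sl

-- Phase-2 loop body: merge one cluster into the result, keyed by its first time.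
def pvMergeCluster (cm : PySem.Dict Int (PySem.Dict String Int))
    (res : PySem.Dict Int (PySem.Dict String Int)) (c : List Int) : PySem.Dict Int (PySem.Dict String Int) :=
  match c with
  | [] => res
  | f :: rest =>
    res.insert f (rest.foldl (fun sl t => pvMergeInto sl (cm.getD t PySem.Dict.empty))
                             (cm.getD f PySem.Dict.empty))

def coalesce_cycle_map_alt (cycle_map : List (Int × List (String × Int))) (merge_gap_ps : Int) : List (Int × List (String × Int)) :=
  let cm := pvToCM cycle_map
  let clusters := (PySem.List.sorted cm.keys (fun x => x) false).foldl (pvClusterStep merge_gap_ps) []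
  (clusters.foldl (pvMergeCluster cm) PySem.Dict.empty).items.map (fun p => (p.1, p.2.items))

-- ===== PRECONDITION & SPEC =====
def Spec_coalesce_cycle_map (cycle_map : List (Int × List (String × Int))) (merge_gap_ps : Int) (out : List (Int × List (String × Int))) : Prop := out = coalesce_cycle_map_alt cycle_map merge_gap_ps
instance (cycle_map : List (Int × List (String × Int))) (merge_gap_ps : Int) (out : List (Int × List (String × Int))) : Decidable (Spec_coalesce_cycle_map cycle_map merge_gap_ps out) := by unfold Spec_coalesce_cycle_map; infer_instance

-- ===== CLAIM (what is proved, stated in full; the proofs are below) =====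
def Claim_equal_coalesce_cycle_map : Prop := ∀ (cycle_map : List (Int × List (String × Int))) (merge_gap_ps : Int), Dom_coalesce_cycle_map cycle_map merge_gap_ps → Spec_coalesce_cycle_map cycle_map merge_gap_ps (coalesce_cycle_map cycle_map merge_gap_ps)

-- ===== LEMMAS AND PROOFS =====

-- A's final 'coalesced[cluster_time] = cluster_slot' applied to a fold state.
def pvFinishA (s : PySem.Dict Int (PySem.Dict String Int) × Option Int × PySem.Dict String Int × Option Int) :
    PySem.Dict Int (PySem.Dict String Int) :=
  match s.2.1 with
  | some ct => s.1.insert ct s.2.2.1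
  | none => s.1

-- the merged slot of the cluster f :: rest
def pvSlotOf (cm : PySem.Dict Int (PySem.Dict String Int)) (f : Int) (rest : List Int) : PySem.Dict String Int :=
  rest.foldl (fun sl t => pvMergeInto sl (cm.getD t PySem.Dict.empty)) (cm.getD f PySem.Dict.empty)

theorem pvClusterStep_ne_nil (gap : Int) (cls : List (List Int)) (t : Int) :
    pvClusterStep gap cls t ≠ [] := by
  unfold pvClusterStep
  cases h : cls.getLast? with
  | none => simp
  | some c =>
    cases h2 : c.getLast? with
    | none => simp [h2]
    | some p => simp only [h2]; split_ifs <;> simp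

theorem pvClusterStep_append (gap : Int) (cls cls' : List (List Int)) (t : Int) (h : cls' ≠ []) :
    pvClusterStep gap (cls ++ cls') t = cls ++ pvClusterStep gap cls' t := by
  unfold pvClusterStep
  rw [List.getLast?_append_of_ne_nil _ h, List.dropLast_append_of_ne_nil h]
  cases h1 : cls'.getLast? with
  | none => simp
  | some c =>
    cases h2 : c.getLast? with
    | none => simp [h2]
    | some p => simp only [h2]; split_ifs <;> simp

theorem foldl_pvClusterStep_append (gap : Int) (ts : List Int) (cls cls' : List (List Int)) (h : cls' ≠ []) :
    ts.foldl (pvClusterStep gap) (cls ++ cls') = cls ++ ts.foldl (pvClusterStep gap) cls' := by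
  induction ts generalizing cls' with
  | nil => rfl
  | cons t ts ih =>
    simp only [List.foldl_cons]
    rw [pvClusterStep_append gap cls cls' t h, ih _ (pvClusterStep_ne_nil gap cls' t)]

-- Main invariant: A's fold (finished clusters already in co, current cluster f :: c with
-- last element p) computes what B computes from the single pending cluster [f :: c].
theorem pv_main (cm : PySem.Dict Int (PySem.Dict String Int)) (gap : Int) (ts : List Int)
    (f : Int) (c : List Int) (p : Int) (co : PySem.Dict Int (PySem.Dict String Int))
    (hp : (f :: c).getLast? = some p) :
    pvFinishA (ts.foldl (pvStepA cm gap) (co, some f, pvSlotOf cm f c, some p))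
      = (ts.foldl (pvClusterStep gap) [f :: c]).foldl (pvMergeCluster cm) co := by
  induction ts generalizing f c p co with
  | nil =>
    simp [pvFinishA, pvMergeCluster, pvSlotOf]
  | cons t ts ih =>
    simp only [List.foldl_cons]
    by_cases hgap : t - p < gap
    · have hA : pvStepA cm gap (co, some f, pvSlotOf cm f c, some p) t
          = (co, some f, pvSlotOf cm f (c ++ [t]), some t) := by
        simp [pvStepA, hgap, pvSlotOf, pvMergeInto]
      have hB : pvClusterStep gap [f :: c] t = [f :: (c ++ [t])] := by
        simp [pvClusterStep, hp, hgap]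
      rw [hA, hB]
      exact ih f (c ++ [t]) t co (by
        have : f :: (c ++ [t]) = (f :: c) ++ [t] := by simp
        rw [this, List.getLast?_concat])
    · have hA : pvStepA cm gap (co, some f, pvSlotOf cm f c, some p) t
          = (co.insert f (pvSlotOf cm f c), some t, cm.getD t PySem.Dict.empty, some t) := by
        simp [pvStepA, hgap]
      have hB : pvClusterStep gap [f :: c] t = [f :: c] ++ [[t]] := by
        simp [pvClusterStep, hp, hgap]
      rw [hA, hB, foldl_pvClusterStep_append gap ts [f :: c] [[t]] (by simp)]
      simp only [List.foldl_cons, List.cons_append, List.nil_append]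
      have : pvMergeCluster cm co (f :: c) = co.insert f (pvSlotOf cm f c) := by
        simp [pvMergeCluster, pvSlotOf]
      rw [this]
      exact ih t [] t _ (by simp)

theorem pv_fold_some (cm : PySem.Dict Int (PySem.Dict String Int)) (gap : Int) (ts : List Int)
    (s : PySem.Dict Int (PySem.Dict String Int) × Option Int × PySem.Dict String Int × Option Int)
    (h : s.2.1.isSome) : ((ts.foldl (pvStepA cm gap) s).2.1).isSome := by
  induction ts generalizing s with
  | nil => exact h
  | cons t ts ih =>
    simp only [List.foldl_cons]
    apply ih
    unfold pvStepA
    cases s.2.1 with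
    | none => simp
    | some ct =>
      cases s.2.2.2 with
      | none => simp
      | some p => dsimp only; split_ifs <;> simp

-- ===== VERDICT (by name: the statement is the Claim_ definition above) =====
theorem coalesce_cycle_map_spec : Claim_equal_coalesce_cycle_map := by
  intro cycle_map gap _
  unfold Spec_coalesce_cycle_map coalesce_cycle_map coalesce_cycle_map_alt
  by_cases h : (pvToCM cycle_map).items = []
  · have hk : (pvToCM cycle_map).keys = [] := by
      simp [PySem.Dict.keys, h]
    have hnil : PySem.List.sorted ([] : List Int) (fun x => x) false = [] :=
      (PySem.List.sorted_perm _ _ _).eq_nil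
    simp [h, hk, hnil, PySem.Dict.empty]
  · have hk : (pvToCM cycle_map).keys ≠ [] := by
      intro hh
      exact h (List.map_eq_nil_iff.mp hh)
    cases hs : PySem.List.sorted (pvToCM cycle_map).keys (fun x => x) false with
    | nil =>
      exfalso
      have hp := PySem.List.sorted_perm (pvToCM cycle_map).keys (fun x => x) false
      rw [hs] at hp
      exact hk hp.symm.eq_nil
    | cons t0 rest =>
      simp only [h, if_false, hs, List.foldl_cons]
      have h0 : pvStepA (pvToCM cycle_map) gap (PySem.Dict.empty, none, PySem.Dict.empty, none) t0
          = (PySem.Dict.empty, some t0, (pvToCM cycle_map).getD t0 PySem.Dict.empty, some t0) := by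
        simp [pvStepA]
      have hB0 : pvClusterStep gap [] t0 = [[t0]] := by simp [pvClusterStep]
      rw [h0, hB0]
      have hmain := pv_main (pvToCM cycle_map) gap rest t0 [] t0 PySem.Dict.empty (by simp)
      have hsome := pv_fold_some (pvToCM cycle_map) gap rest
        (PySem.Dict.empty, some t0, (pvToCM cycle_map).getD t0 PySem.Dict.empty, some t0) (by simp)
      obtain ⟨ct, hct⟩ := Option.isSome_iff_exists.mp hsome
      rw [pvSlotOf] at hmain
      simp only [List.foldl_nil] at hmain
      rw [hct, ← hmain]
      simp [pvFinishA, hct]
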